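-- pv_equiv track=rewrite | github.com/jinurumi/Algorithm | 프로그래머스/0/181918. 배열 만들기 4/배열 만들기 4.py | solution
-- ===== SOURCE A (Python) =====
-- def solution(arr):
--     stk = []
--     i=0
--     while len(arr) > i:
--         if len(stk)==0:
--             stk.append(arr[i])
--             i+=1
--         elif len(stk) >=1 and stk[-1] < arr[i]:
--             stk.append(arr[i])
--             i+=1
--         elif len(stk) >=1 and stk[-1] >= arr[i]:
--             del stk[-1]
--     return stk
-- ===== SOURCE B (Python) =====
-- def solution(arr):
--     # An element survives iff it is strictly smaller than every element after it:
--     # scan from the right keeping a running minimum, then restore original order.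
--     res = []
--     m = None
--     for x in reversed(arr):
--         if m is None or x < m:
--             res.append(x)
--             m = x
--     res.reverse()
--     return res
-- ===== Notes on version B (the rewrite author's own statement) =====
-- stated objective: faster
-- what changed: Replaced A's monotonic stack (pop while top >= current, then push) with a stackless backward scan: an element survives iff it is strictly below the running suffix minimum, collected right-to-left and reversed at the end; no stack pushes/pops, one comparison per element.
import Mathlib
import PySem

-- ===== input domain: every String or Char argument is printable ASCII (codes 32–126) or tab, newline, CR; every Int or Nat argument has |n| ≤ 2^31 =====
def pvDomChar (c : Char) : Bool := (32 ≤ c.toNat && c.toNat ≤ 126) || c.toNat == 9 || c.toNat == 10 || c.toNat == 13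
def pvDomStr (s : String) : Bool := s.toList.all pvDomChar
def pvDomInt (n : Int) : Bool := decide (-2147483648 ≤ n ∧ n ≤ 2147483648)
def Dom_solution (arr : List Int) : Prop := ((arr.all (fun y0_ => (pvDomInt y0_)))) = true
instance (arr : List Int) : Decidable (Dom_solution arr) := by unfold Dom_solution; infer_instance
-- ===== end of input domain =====

-- B replaces A's monotonic stack with a stackless backward scan keeping a running
-- suffix minimum (an element survives iff strictly below every later element); same values.

-- ===== PORT A =====
-- A's Python stack appends/reads/deletes at the right end; the port keeps the stack
-- head-first (top = head), returning its reverse, which is the same list A returns.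
def solutionLoopA (arr : List Int) (stk : List Int) (i : Nat) : List Int :=
  if h : i < arr.length then
    match stk with
    | [] => solutionLoopA arr [arr[i]] (i + 1)
    | t :: rest =>
      if t < arr[i] then solutionLoopA arr (arr[i] :: t :: rest) (i + 1)
      else solutionLoopA arr rest i
  else stk.reverse
termination_by (arr.length - i, stk.length)
decreasing_by
  · exact Prod.Lex.left _ _ (by omega)
  · exact Prod.Lex.left _ _ (by omega)
  · exact Prod.Lex.right _ (by simp)

def solution (arr : List Int) : List Int := solutionLoopA arr [] 0

-- ===== PORT B =====
-- `for x in reversed(arr)` with running minimum m; Python appends kept elements to res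
-- and reverses res at the end — the cons-accumulator acc is exactly that reversed result.
def solBLoop : List Int → List Int → Option Int → List Int
  | [], acc, _ => acc
  | x :: xs, acc, m =>
    match m with
    | none => solBLoop xs (x :: acc) (some x)
    | some v => if x < v then solBLoop xs (x :: acc) (some x) else solBLoop xs acc (some v)

def solution_alt (arr : List Int) : List Int := solBLoop arr.reverse [] none

-- ===== PRECONDITION & SPEC =====
def Spec_solution (arr : List Int) (out : List Int) : Prop := out = solution_alt arr
instance (arr : List Int) (out : List Int) : Decidable (Spec_solution arr out) := by unfold Spec_solution; infer_instance

-- ===== CLAIM (what is proved, stated in full; the proofs are below) =====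
def Claim_equal_solution : Prop := ∀ (arr : List Int), Dom_solution arr → Spec_solution arr (solution arr)

-- ===== LEMMAS AND PROOFS =====

-- proof-side helpers: one A-step pops while top ≥ x then pushes x
def popGE (x : Int) : List Int → List Int
  | [] => []
  | t :: rest => if t ≥ x then popGE x rest else t :: rest

def Astk : List Int → List Int → List Int
  | [], stk => stk
  | x :: xs, stk => Astk xs (x :: popGE x stk)

-- "x is strictly below the optional threshold" (none = no threshold yet)
def ltOpt (x : Int) (m : Option Int) : Bool :=
  match m with
  | none => true
  | some v => decide (x < v)

-- the common characterisation: keep x iff x < every later element and x < the threshold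
def Kc : List Int → Option Int → List Int
  | [], _ => []
  | x :: xs, m => if xs.all (fun y => decide (x < y)) && ltOpt x m then x :: Kc xs m else Kc xs m

theorem solutionLoopA_step (arr : List Int) (i : Nat) (h : i < arr.length) :
    ∀ stk, solutionLoopA arr stk i
      = solutionLoopA arr (arr[i] :: popGE arr[i] stk) (i + 1) := by
  intro stk
  induction stk with
  | nil => rw [solutionLoopA]; simp only [h, dif_pos, popGE]
  | cons t rest ih =>
    rw [solutionLoopA]
    simp only [h, dif_pos]
    by_cases hlt : t < arr[i]
    · simp [hlt, popGE, not_le.mpr hlt]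
    · simp only [hlt, if_false]
      rw [ih, popGE, if_pos (not_lt.mp hlt)]

theorem solutionLoopA_eq_Astk (arr : List Int) :
    ∀ n i stk, arr.length - i ≤ n →
      solutionLoopA arr stk i = (Astk (arr.drop i) stk).reverse := by
  intro n
  induction n with
  | zero =>
    intro i stk hn
    have hge : arr.length ≤ i := by omega
    rw [solutionLoopA]
    simp [List.drop_eq_nil_of_le hge, Astk, Nat.not_lt.mpr hge]
  | succ n ih =>
    intro i stk hn
    by_cases h : i < arr.length
    · rw [solutionLoopA_step arr i h stk, ih (i + 1) _ (by omega),
        List.drop_eq_getElem_cons h, Astk]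
    · rw [solutionLoopA]
      simp [List.drop_eq_nil_of_le (Nat.not_lt.mp h), Astk, h]

theorem popGE_eq_filter (x : Int) :
    ∀ stk : List Int, stk.Pairwise (· > ·) →
      popGE x stk = stk.filter (fun t => decide (t < x)) := by
  intro stk hp
  induction stk with
  | nil => rfl
  | cons t rest ih =>
    rcases List.pairwise_cons.mp hp with ⟨hall, hrest⟩
    by_cases hge : t ≥ x
    · simp [popGE, hge, not_lt.mpr hge, ih hrest]
    · have hlt : t < x := not_le.mp hge
      have : rest.filter (fun t => decide (t < x)) = rest := by
        apply List.filter_eq_self.mpr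
        intro y hy
        have := hall y hy
        simp; omega
      simp [popGE, hge, hlt, this]

theorem pairwise_push (x : Int) (stk : List Int) (hp : stk.Pairwise (· > ·)) :
    (x :: popGE x stk).Pairwise (· > ·) := by
  rw [popGE_eq_filter x stk hp]
  refine List.pairwise_cons.mpr ⟨?_, hp.sublist List.filter_sublist⟩
  intro y hy
  have := List.of_mem_filter hy
  simpa using this

theorem Astk_eq_Kc :
    ∀ (l stk : List Int), stk.Pairwise (· > ·) →
      Astk l stk = (Kc l none).reverse ++ stk.filter (fun t => l.all (fun y => decide (t < y))) := by
  intro l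
  induction l with
  | nil =>
    intro stk _
    simp [Astk, Kc, List.filter_eq_self.mpr]
  | cons x xs ih =>
    intro stk hp
    rw [Astk, ih _ (pairwise_push x stk hp), popGE_eq_filter x stk hp]
    have hfilt : (stk.filter (fun t => decide (t < x))).filter
          (fun t => xs.all (fun y => decide (t < y)))
        = stk.filter (fun t => (x :: xs).all (fun y => decide (t < y))) := by
      rw [List.filter_filter]
      apply List.filter_congr
      intro t _
      simp [List.all_cons, Bool.and_comm]
    by_cases hall : xs.all (fun y => decide (x < y))
    · simp only [Kc, hall, ltOpt, Bool.and_true, if_pos, List.reverse_cons, List.filter_cons]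
      have hx : (xs.all (fun y => decide (x < y)) : Bool) = true := hall
      simp [hfilt, List.append_assoc]
    · have hx : (xs.all (fun y => decide (x < y)) : Bool) = false := by
        simpa using hall
      simp only [Kc, hx, ltOpt, Bool.false_and, List.filter_cons]
      simp [hfilt]

theorem Kc_append (x : Int) :
    ∀ (ys : List Int) (m : Option Int),
      Kc (ys ++ [x]) m
        = Kc ys (if ltOpt x m then some x else m) ++ (if ltOpt x m then [x] else []) := by
  intro ys
  induction ys with
  | nil =>
    intro m
    by_cases h : ltOpt x m = true
    · simp [Kc, h]
    · simp [Kc, h]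
  | cons y ys ih =>
    intro m
    have hcond : ((ys ++ [x]).all (fun z => decide (y < z)) && ltOpt y m)
        = (ys.all (fun z => decide (y < z)) && ltOpt y (if ltOpt x m then some x else m)) := by
      cases m with
      | none =>
        simp [ltOpt, List.all_append, Bool.and_comm]
      | some v =>
        by_cases hxv : x < v
        · by_cases hyx : y < x
          · have hyv : y < v := lt_trans hyx hxv
            simp [ltOpt, hxv, hyx, hyv, List.all_append]
          · simp [ltOpt, hxv, hyx, List.all_append]
        · by_cases hyv : y < v
          · have hyx : y < x := lt_of_lt_of_le hyv (not_lt.mp hxv)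
            simp [ltOpt, hxv, hyx, hyv, List.all_append]
          · simp [ltOpt, hxv, hyv, List.all_append]
    show Kc ((y :: ys) ++ [x]) m = _
    rw [List.cons_append, Kc, Kc, hcond, ih m]
    by_cases h : (ys.all (fun z => decide (y < z)) && ltOpt y (if ltOpt x m then some x else m)) = true
    · simp [h]
    · simp only [Bool.not_eq_true] at h
      simp [h]

theorem solBLoop_eq_Kc :
    ∀ (r acc : List Int) (m : Option Int),
      solBLoop r acc m = Kc r.reverse m ++ acc := by
  intro r
  induction r with
  | nil => intro acc m; simp [solBLoop, Kc]
  | cons x xs ih =>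
    intro acc m
    have hrev : (x :: xs).reverse = xs.reverse ++ [x] := by simp
    rw [hrev, Kc_append]
    cases m with
    | none =>
      have hlt : ltOpt x none = true := rfl
      rw [solBLoop, ih (x :: acc) (some x)]
      simp [hlt]
    | some v =>
      by_cases hxv : x < v
      · have hlt : ltOpt x (some v) = true := by simp [ltOpt, hxv]
        rw [solBLoop]
        simp only [hxv, if_pos]
        rw [ih (x :: acc) (some x)]
        simp [hlt]
      · have hlt : ltOpt x (some v) = false := by simp [ltOpt, hxv]
        rw [solBLoop]
        simp only [hxv, if_neg, not_false_iff]
        rw [ih acc (some v)]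
        simp [hlt]

-- ===== VERDICT (by name: the statement is the Claim_ definition above) =====
theorem solution_spec : Claim_equal_solution := by
  intro arr _
  show solution arr = solution_alt arr
  unfold solution solution_alt
  rw [solutionLoopA_eq_Astk arr arr.length 0 [] (by omega)]
  simp only [List.drop_zero]
  rw [Astk_eq_Kc arr [] List.Pairwise.nil, solBLoop_eq_Kc arr.reverse [] none]
  simp
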